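-- pv_equiv track=rewrite | github.com/Ruby-Betancourt/ProgLabEs | Foglio1/Esercizio1.py | somma_vettoriale
-- ===== SOURCE A (Python) =====
-- def somma_vettoriale(a,b):
--     #controllo se a è fatta da interi
--     count_a=0
--     for element in range (len(a)):
--         if type(a[element]) is int:
--             count_a+=1
--
--     #controllo se b è fatta da interi
--     count_b=0
--     for element in range (len(b)):
--         if type(b[element]) is int:
--             count_b+=1
--
--     #stessa dimensione a e b?
--     new_list=[]
--     if count_a==len(a) and count_b==len(b):
--         if len(a)==len(b):
--             for el in range (len(a)):
--                 som=a[el]+b[el]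
--                 new_list.append(som)
--     return new_list
-- ===== SOURCE B (Python) =====
-- def somma_vettoriale(a, b):
--     if len(a) != len(b):
--         return []
--     out = []
--     for x, y in zip(a, b):
--         if type(x) is not int or type(y) is not int:
--             return []
--         out.append(x + y)
--     return out
-- ===== Notes on version B (the rewrite author's own statement) =====
-- stated objective: simpler
-- what changed: B replaces A's three separate passes (count ints in a, count ints in b, then index-loop summing) with a single length check followed by one fused validate-and-sum pass over zip(a,b), returning [] immediately on any failure.
import Mathlib
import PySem

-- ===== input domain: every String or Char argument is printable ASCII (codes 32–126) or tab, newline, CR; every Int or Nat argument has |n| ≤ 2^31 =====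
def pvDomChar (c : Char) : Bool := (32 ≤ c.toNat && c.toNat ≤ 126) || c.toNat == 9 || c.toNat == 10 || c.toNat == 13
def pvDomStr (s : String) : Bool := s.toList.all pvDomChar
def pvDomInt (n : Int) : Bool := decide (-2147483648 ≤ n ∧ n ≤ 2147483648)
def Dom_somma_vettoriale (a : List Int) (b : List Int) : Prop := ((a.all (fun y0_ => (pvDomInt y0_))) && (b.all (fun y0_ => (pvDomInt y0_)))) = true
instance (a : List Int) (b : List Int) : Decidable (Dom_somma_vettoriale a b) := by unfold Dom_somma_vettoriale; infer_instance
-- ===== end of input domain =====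

-- ===== PORT A =====
-- Port of A: two counting passes over index ranges (the 'type(...) is int' test is
-- identically true for List Int, ported as the constant-true branch), then the sum loop.
def somma_vettoriale (a : List Int) (b : List Int) : List Int :=
  let count_a : Int :=
    (PySem.List.pyRange 0 (a.length : Int) 1).foldl
      (fun c _ => if True then c + 1 else c) 0
  let count_b : Int :=
    (PySem.List.pyRange 0 (b.length : Int) 1).foldl
      (fun c _ => if True then c + 1 else c) 0
  if count_a = (a.length : Int) ∧ count_b = (b.length : Int) then
    if a.length = b.length then
      (PySem.List.pyRange 0 (a.length : Int) 1).foldl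
        (fun acc el => acc ++ [PySem.List.pyGetD a el 0 + PySem.List.pyGetD b el 0]) []
    else []
  else []

-- ===== PORT B =====
-- Port of B: single fused pass over the zipped pair (the per-element int type test of
-- Source B is identically true for List Int, so the early-return branch never fires).
def somma_vettoriale_alt (a : List Int) (b : List Int) : List Int :=
  if a.length ≠ b.length then []
  else (a.zip b).map (fun p => p.1 + p.2)

-- ===== PRECONDITION & SPEC =====
def Spec_somma_vettoriale (a : List Int) (b : List Int) (out : List Int) : Prop := out = somma_vettoriale_alt a b
instance (a : List Int) (b : List Int) (out : List Int) : Decidable (Spec_somma_vettoriale a b out) := by unfold Spec_somma_vettoriale; infer_instance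

-- ===== CLAIM (what is proved, stated in full; the proofs are below) =====
def Claim_equal_somma_vettoriale : Prop := ∀ (a : List Int) (b : List Int), Dom_somma_vettoriale a b → Spec_somma_vettoriale a b (somma_vettoriale a b)

-- ===== LEMMAS AND PROOFS =====

-- the counting loop of A just counts the indices
theorem pv_count_loop (n : Int) :
    (PySem.List.pyRange 0 n 1).foldl (fun c _ => if True then c + 1 else c) 0
      = ((PySem.List.pyRange 0 n 1).length : Int) := by
  simp only [if_true]
  induction (PySem.List.pyRange 0 n 1) using List.reverseRecOn with
  | nil => simp
  | append_singleton xs x ih =>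
      simp only [List.foldl_append, List.foldl_cons, List.foldl_nil, ih,
        List.length_append, List.length_cons, List.length_nil]
      push_cast
      ring

-- A's sum loop over indices equals B's map over the zip (for equal lengths)
theorem pv_sum_loop (a b : List Int) (h : a.length = b.length) :
    (PySem.List.pyRange 0 (a.length : Int) 1).foldl
      (fun acc el => acc ++ [PySem.List.pyGetD a el 0 + PySem.List.pyGetD b el 0]) []
    = (a.zip b).map (fun p => p.1 + p.2) := by
  rw [PySem.List.foldl_append_singleton_eq_map]
  simp only [List.nil_append]
  apply List.ext_getElem
  · simp [PySem.List.length_pyRange_one, h]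
  · intro k h1 h2
    have hk : k < a.length := by
      simpa [PySem.List.length_pyRange_one] using h1
    simp only [List.getElem_map, PySem.List.getElem_pyRange_one, List.getElem_zip,
      zero_add, PySem.List.pyGetD_natCast]
    rw [List.getD_eq_getElem _ _ hk, List.getD_eq_getElem _ _ (h ▸ hk)]

-- ===== VERDICT (by name: the statement is the Claim_ definition above) =====
theorem somma_vettoriale_spec : Claim_equal_somma_vettoriale := by
  intro a b _
  show somma_vettoriale a b = somma_vettoriale_alt a b
  unfold somma_vettoriale somma_vettoriale_alt
  rw [pv_count_loop, pv_count_loop]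
  have hca : (((PySem.List.pyRange 0 (a.length : Int) 1).length : Nat) : Int) = (a.length : Int) := by
    simp [PySem.List.length_pyRange_one]
  have hcb : (((PySem.List.pyRange 0 (b.length : Int) 1).length : Nat) : Int) = (b.length : Int) := by
    simp [PySem.List.length_pyRange_one]
  rw [if_pos ⟨hca, hcb⟩]
  by_cases h : a.length = b.length
  · rw [if_pos h, if_neg (by simp [h]), pv_sum_loop a b h]
  · rw [if_neg h, if_pos h]
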